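-- pv_equiv track=rewrite | github.com/RohanBh/LogicNLG-wip | gen_new_data.py | improve_yt
-- ===== SOURCE A (Python) =====
-- def improve_yt(yt):
--     last_ent = False
--     new_yt_split = []
--     for x in yt.split(' '):
--         if x == '[ENT]':
--             if not last_ent:
--                 new_yt_split.append('[ENT]')
--             last_ent = True
--         elif x.isnumeric():
--             if not last_ent:
--                 new_yt_split.append('[ENT]')
--             last_ent = True
--         else:
--             new_yt_split.append(x)
--             last_ent = False
--     return ' '.join(new_yt_split)
-- ===== SOURCE B (Python) =====
-- def improve_yt(yt):
--     def is_entity(t):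
--         return t == '[ENT]' or t.isnumeric()
--
--     tokens = yt.split(' ')
--     out = []
--     i, n = 0, len(tokens)
--     while i < n:
--         k = is_entity(tokens[i])
--         j = i + 1
--         while j < n and is_entity(tokens[j]) == k:
--             j += 1
--         if k:
--             out.append('[ENT]')
--         else:
--             out.extend(tokens[i:j])
--         i = j
--     return ' '.join(out)
-- ===== Notes on version B (the rewrite author's own statement) =====
-- stated objective: simpler
-- what changed: Replaces the last_ent flag threaded through a token-by-token loop by a run decomposition: scan each maximal run of equal-class tokens with two pointers, emitting one '[ENT]' per entity run and the run itself otherwise.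
import Mathlib
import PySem

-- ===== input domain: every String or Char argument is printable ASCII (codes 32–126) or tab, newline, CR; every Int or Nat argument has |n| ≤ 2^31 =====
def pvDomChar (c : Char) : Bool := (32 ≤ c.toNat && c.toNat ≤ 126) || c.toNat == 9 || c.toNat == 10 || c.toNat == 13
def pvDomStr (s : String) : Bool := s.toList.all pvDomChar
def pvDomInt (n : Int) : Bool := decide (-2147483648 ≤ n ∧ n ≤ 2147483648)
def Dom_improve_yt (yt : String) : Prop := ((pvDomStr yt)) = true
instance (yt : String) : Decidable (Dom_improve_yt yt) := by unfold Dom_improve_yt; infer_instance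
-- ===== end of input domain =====

-- B collapses runs with a two-pointer scan instead of A's last_ent flag; objective: simpler. Same return value.

-- x.isnumeric(): on the printable-ASCII domain this is exactly "nonempty and all chars 0-9",
-- i.e. PySem.Str.strIsdigit (exact on Dom_improve_yt; the wider Unicode numerics lie outside it).
-- yt.split(' '): sep is the nonempty literal ' ', so PySem.Str.split? is always `some`;
-- the `.getD []` default is never taken.
def pvSplitSp (yt : String) : List String := (PySem.Str.split? yt " ").getD []

-- ===== PORT A =====
-- the body of A's for-loop, branches in source order, state = (last_ent, new_yt_split)
def pvStepA (st : Bool × List String) (x : String) : Bool × List String :=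
  if x == "[ENT]" then
    (true, if !st.1 then st.2 ++ ["[ENT]"] else st.2)
  else if PySem.Str.strIsdigit x then   -- x.isnumeric(), exact on the ASCII domain
    (true, if !st.1 then st.2 ++ ["[ENT]"] else st.2)
  else
    (false, st.2 ++ [x])

def improve_yt (yt : String) : String :=
  PySem.Str.join " " ((pvSplitSp yt).foldl pvStepA (false, [])).2

-- ===== PORT B =====
def pvIsEnt (x : String) : Bool := x == "[ENT]" || PySem.Str.strIsdigit x

-- the outer while-loop of Source B: each step consumes one maximal run of equal-class tokens;
-- the inner j-scan and the tokens[i:j] slice are transcribed as takeWhile/dropWhile on the suffix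
def pvAltLoop : List String → List String
  | [] => []
  | x :: xs =>
      let k := pvIsEnt x
      (if k then ["[ENT]"] else x :: xs.takeWhile (fun t => pvIsEnt t == k)) ++
        pvAltLoop (xs.dropWhile (fun t => pvIsEnt t == k))
termination_by xs => xs.length
decreasing_by
  exact lt_of_le_of_lt (List.length_dropWhile_le _ _) (by simp)

def improve_yt_alt (yt : String) : String :=
  PySem.Str.join " " (pvAltLoop (pvSplitSp yt))

-- ===== PRECONDITION & SPEC =====
def Spec_improve_yt (yt : String) (out : String) : Prop := out = improve_yt_alt yt
instance (yt : String) (out : String) : Decidable (Spec_improve_yt yt out) := by unfold Spec_improve_yt; infer_instance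

-- ===== CLAIM (what is proved, stated in full; the proofs are below) =====
def Claim_equal_improve_yt : Prop := ∀ (yt : String), Dom_improve_yt yt → Spec_improve_yt yt (improve_yt yt)

-- ===== LEMMAS AND PROOFS =====

-- front-building form of A's loop (proof helper)
def pvLoopA : Bool → List String → List String
  | _, [] => []
  | last, x :: xs =>
      if pvIsEnt x then
        (if !last then ["[ENT]"] else []) ++ pvLoopA true xs
      else
        x :: pvLoopA false xs

theorem pvStepA_ent (st : Bool × List String) (x : String) (h : pvIsEnt x = true) :
    pvStepA st x = (true, if !st.1 then st.2 ++ ["[ENT]"] else st.2) := by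
  unfold pvIsEnt at h
  unfold pvStepA
  by_cases h1 : x == "[ENT]"
  · simp only [h1, if_true]
  · have h2 : PySem.Str.strIsdigit x = true := by
      rcases Bool.or_eq_true_iff.mp h with h' | h'
      · exact absurd h' h1
      · exact h'
    simp only [h1, h2, Bool.false_eq_true, if_false, if_true]

theorem pvStepA_nonent (st : Bool × List String) (x : String) (h : pvIsEnt x = false) :
    pvStepA st x = (false, st.2 ++ [x]) := by
  unfold pvIsEnt at h
  have h' := Bool.or_eq_false_iff.mp h
  unfold pvStepA
  simp only [h'.1, h'.2, Bool.false_eq_true, if_false]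

theorem pvFoldl_eq_loopA (xs : List String) : ∀ (last : Bool) (acc : List String),
    (xs.foldl pvStepA (last, acc)).2 = acc ++ pvLoopA last xs := by
  induction xs with
  | nil => intro last acc; simp [pvLoopA]
  | cons x xs ih =>
      intro last acc
      by_cases h : pvIsEnt x
      · rw [List.foldl_cons, pvStepA_ent _ _ h]
        cases last <;> simp [ih, pvLoopA, h]
      · rw [List.foldl_cons, pvStepA_nonent _ _ (by simpa using h)]
        simp [ih, pvLoopA, h]

theorem pvLoopA_true_dropWhile (ys : List String) :
    pvLoopA true ys = pvLoopA true (ys.dropWhile pvIsEnt) := by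
  induction ys with
  | nil => rfl
  | cons y ys ih =>
      by_cases h : pvIsEnt y
      · simp [pvLoopA, h, ih]
      · simp [h]

theorem pvLoopA_true_eq_false (ys : List String)
    (h : ys = [] ∨ ∃ y ys', ys = y :: ys' ∧ pvIsEnt y = false) :
    pvLoopA true ys = pvLoopA false ys := by
  rcases h with rfl | ⟨y, ys', rfl, hy⟩
  · rfl
  · simp [pvLoopA, hy]

theorem pvLoopA_false_run (ys : List String) :
    pvLoopA false ys = ys.takeWhile (fun t => !pvIsEnt t) ++
      pvLoopA false (ys.dropWhile (fun t => !pvIsEnt t)) := by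
  induction ys with
  | nil => rfl
  | cons y ys ih =>
      by_cases h : pvIsEnt y
      · simp [h]
      · simp [pvLoopA, h]
        exact ih

theorem pvHead_dropWhile {p : String → Bool} (ys : List String) :
    ys.dropWhile p = [] ∨ ∃ y ys', ys.dropWhile p = y :: ys' ∧ p y = false := by
  induction ys with
  | nil => exact Or.inl rfl
  | cons y ys ih =>
      by_cases h : p y
      · simpa [h] using ih
      · exact Or.inr ⟨y, ys, by simp [h], by simp [h]⟩

theorem pvLoopA_false_eq_alt : ∀ (ys : List String), pvLoopA false ys = pvAltLoop ys := by
  intro ys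
  induction hn : ys.length using Nat.strong_induction_on generalizing ys with
  | _ n ih =>
    cases ys with
    | nil => rw [pvAltLoop.eq_def]; rfl
    | cons y ys' =>
      subst hn
      by_cases h : pvIsEnt y
      · -- entity run: A emits one [ENT] then skips the rest of the run
        have e1 : pvLoopA false (y :: ys') = "[ENT]" :: pvLoopA true ys' := by
          simp [pvLoopA, h]
        have e2 : pvLoopA true ys' = pvLoopA false (ys'.dropWhile pvIsEnt) :=
          (pvLoopA_true_dropWhile ys').trans
            (pvLoopA_true_eq_false _ (pvHead_dropWhile ys'))
        have e3 : pvLoopA false (ys'.dropWhile pvIsEnt) = pvAltLoop (ys'.dropWhile pvIsEnt) :=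
          ih _ (Nat.lt_succ_of_le (List.length_dropWhile_le _ _)) _ rfl
        conv_rhs => rw [pvAltLoop.eq_def]
        rw [e1, e2, e3]
        simp [h]
      · -- non-entity run: A copies each token of the run
        have e1 : pvLoopA false (y :: ys') = y ::
            (ys'.takeWhile (fun t => !pvIsEnt t) ++
              pvLoopA false (ys'.dropWhile (fun t => !pvIsEnt t))) := by
          rw [pvLoopA]
          simp only [h, Bool.false_eq_true, if_false]
          rw [pvLoopA_false_run ys']
        have e3 : pvLoopA false (ys'.dropWhile (fun t => !pvIsEnt t)) =
            pvAltLoop (ys'.dropWhile (fun t => !pvIsEnt t)) :=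
          ih _ (Nat.lt_succ_of_le (List.length_dropWhile_le _ _)) _ rfl
        conv_rhs => rw [pvAltLoop.eq_def]
        rw [e1, e3]
        simp [h]

-- ===== VERDICT (by name: the statement is the Claim_ definition above) =====
theorem improve_yt_spec : Claim_equal_improve_yt := by
  intro yt _
  show improve_yt yt = improve_yt_alt yt
  unfold improve_yt improve_yt_alt
  rw [pvFoldl_eq_loopA, pvLoopA_false_eq_alt]
  rfl
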